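-- pv_equiv track=rewrite | github.com/rocksoljaeckle/DavisBaconApp | db_utils.py | get_lines_page_numbers
-- ===== SOURCE A (Python) =====
-- def get_lines_page_numbers(lines: list[int], page_lengths: list[int]) -> dict[int, list[int]]:
--     """Get the pages corresponding to the given line numbers.
--
--     Returns a dict mapping page # to the lines to highlight on that page."""
--     lines = sorted(lines)
--     pages = dict()
--     lines_ind = 0
--     cumulative_lines = 0
--     for page_index, page_length in enumerate(page_lengths):
--         while lines_ind < len(lines):
--             if lines[lines_ind] < cumulative_lines + page_length:
--                 if page_index not in pages:
--                     pages[page_index] = []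
--                 pages[page_index].append(lines[lines_ind]-cumulative_lines)
--                 lines_ind += 1
--             else:
--                 break
--         cumulative_lines += page_length
--     return pages
-- ===== SOURCE B (Python) =====
-- def get_lines_page_numbers(lines: list[int], page_lengths: list[int]) -> dict[int, list[int]]:
--     """Get the pages corresponding to the given line numbers.
--
--     Returns a dict mapping page # to the lines to highlight on that page."""
--     bounds = []
--     start = 0
--     for length in page_lengths:
--         bounds.append((start, start + length))
--         start += length
--     pages = {}
--     for line in sorted(lines):
--         for page, (lo, hi) in enumerate(bounds):
--             if line < hi:
--                 pages.setdefault(page, []).append(line - lo)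
--                 break
--     return pages
-- ===== Notes on version B (the rewrite author's own statement) =====
-- stated objective: alternative
-- what changed: Replaces A's page-major merge (one shared line pointer advanced by a while/break loop inside the page loop) with a line-major pass: page (start, end) bounds are precomputed once, then each sorted line is placed on the first page whose end offset exceeds it.
import Mathlib
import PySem

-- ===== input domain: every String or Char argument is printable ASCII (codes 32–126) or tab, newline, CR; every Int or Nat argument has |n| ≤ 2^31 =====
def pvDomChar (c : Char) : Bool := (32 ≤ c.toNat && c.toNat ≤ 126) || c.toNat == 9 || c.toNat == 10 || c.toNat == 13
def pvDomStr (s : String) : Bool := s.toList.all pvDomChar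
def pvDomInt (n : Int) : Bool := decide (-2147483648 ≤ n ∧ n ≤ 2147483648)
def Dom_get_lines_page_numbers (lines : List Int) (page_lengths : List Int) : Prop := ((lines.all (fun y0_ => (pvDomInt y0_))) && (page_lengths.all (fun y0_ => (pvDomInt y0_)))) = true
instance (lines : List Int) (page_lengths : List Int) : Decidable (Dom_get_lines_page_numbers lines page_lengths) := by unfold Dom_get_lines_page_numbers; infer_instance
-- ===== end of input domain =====

-- B replaces A's page-major merge (shared line pointer, while/break) with a line-major pass:
-- page (start, end) bounds are precomputed once, then each sorted line is placed on the first
-- page whose end offset exceeds it.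

-- ===== PORT A =====
-- inner 'while lines_ind < len(lines)' loop: the index is represented by the remaining suffix of the sorted list
def pvAWhile (pageIdx : Int) (pageLen : Int) (cum : Int) :
    PySem.Dict Int (List Int) → List Int → PySem.Dict Int (List Int) × List Int
  | pages, [] => (pages, [])
  | pages, x :: rest =>
    if x < cum + pageLen then
      let pages1 := if pages.contains pageIdx then pages else pages.insert pageIdx []
      pvAWhile pageIdx pageLen cum (pages1.modify pageIdx [] (fun l => l ++ [x - cum])) rest
    else (pages, x :: rest)

-- 'for page_index, page_length in enumerate(page_lengths)'
def pvAOuter : List Int → Int → Int → PySem.Dict Int (List Int) → List Int → PySem.Dict Int (List Int)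
  | [], _, _, pages, _ => pages
  | pl :: pls, pageIdx, cum, pages, ls =>
    let r := pvAWhile pageIdx pl cum pages ls
    pvAOuter pls (pageIdx + 1) (cum + pl) r.1 r.2

def get_lines_page_numbers (lines : List Int) (page_lengths : List Int) : List (Int × List Int) :=
  (pvAOuter page_lengths 0 0 PySem.Dict.empty (PySem.List.sorted lines (fun x => x) false)).items

-- ===== PORT B =====
-- 'for length in page_lengths: bounds.append((start, start + length)); start += length'
def pvBounds : List Int → Int → List (Int × Int)
  | [], _ => []
  | pl :: pls, t => (t, t + pl) :: pvBounds pls (t + pl)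

-- body of the 'for line in sorted(lines)' loop: the inner 'for page, (lo, hi) in enumerate(bounds)'
-- with its 'break' is the first enumerated bound satisfying 'line < hi' (find?)
def pvBStep (bounds : List (Int × Int)) (pages : PySem.Dict Int (List Int)) (line : Int) :
    PySem.Dict Int (List Int) :=
  match (PySem.List.enumerate bounds).find? (fun p => decide (line < p.2.2)) with
  | none => pages
  | some (q, se) => (pages.setdefault q []).modify q [] (fun l => l ++ [line - se.1])

def get_lines_page_numbers_alt (lines : List Int) (page_lengths : List Int) : List (Int × List Int) :=
  ((PySem.List.sorted lines (fun x => x) false).foldl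
    (pvBStep (pvBounds page_lengths 0)) PySem.Dict.empty).items

-- ===== PRECONDITION & SPEC =====
def Spec_get_lines_page_numbers (lines : List Int) (page_lengths : List Int) (out : List (Int × List Int)) : Prop := out = get_lines_page_numbers_alt lines page_lengths
instance (lines : List Int) (page_lengths : List Int) (out : List (Int × List Int)) : Decidable (Spec_get_lines_page_numbers lines page_lengths out) := by unfold Spec_get_lines_page_numbers; infer_instance

-- ===== CLAIM (what is proved, stated in full; the proofs are below) =====
def Claim_equal_get_lines_page_numbers : Prop := ∀ (lines : List Int) (page_lengths : List Int), Dom_get_lines_page_numbers lines page_lengths → Spec_get_lines_page_numbers lines page_lengths (get_lines_page_numbers lines page_lengths)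

-- ===== LEMMAS AND PROOFS =====

-- the single-line update A performs, spelled out
def pvAStep (i : Int) (c : Int) (d : PySem.Dict Int (List Int)) (x : Int) : PySem.Dict Int (List Int) :=
  (if d.contains i then d else d.insert i []).modify i [] (fun l => l ++ [x - c])

lemma pvBStep_no_match (bounds : List (Int × Int)) (x : Int)
    (h : ∀ b ∈ bounds, ¬ x < b.2) (d : PySem.Dict Int (List Int)) :
    pvBStep bounds d x = d := by
  unfold pvBStep
  have hf : (PySem.List.enumerate bounds).find? (fun p => decide (x < p.2.2)) = none := by
    apply List.find?_eq_none.mpr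
    intro p hp
    rcases (PySem.List.mem_enumerate_iff _ _ _).mp hp with ⟨k, hk, rfl⟩
    simpa using h _ (List.getElem_mem hk)
  simp [hf]

lemma foldl_pvBStep_no_match (bounds : List (Int × Int)) :
    ∀ (ls : List Int) (d : PySem.Dict Int (List Int)),
      (∀ x ∈ ls, ∀ b ∈ bounds, ¬ x < b.2) → ls.foldl (pvBStep bounds) d = d := by
  intro ls
  induction ls with
  | nil => intro d _; rfl
  | cons x rest ih =>
    intro d h
    simp only [List.foldl_cons]
    rw [pvBStep_no_match bounds x (h x (by simp)) d]
    exact ih d (fun y hy => h y (by simp [hy]))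

lemma pvAWhile_spec (i pl c : Int) :
    ∀ (ls : List Int) (d : PySem.Dict Int (List Int)),
      pvAWhile i pl c d ls =
        ((ls.takeWhile (fun x => decide (x < c + pl))).foldl (pvAStep i c) d,
         ls.dropWhile (fun x => decide (x < c + pl))) := by
  intro ls
  induction ls with
  | nil => intro d; rfl
  | cons x rest ih =>
    intro d
    by_cases hx : x < c + pl
    · simp [pvAWhile, hx, ih, pvAStep]
    · simp [pvAWhile, hx]

lemma find?_locate (pre : List (Int × Int)) (ce : Int × Int) (rest : List (Int × Int)) (x : Int)
    (hpre : ∀ b ∈ pre, ¬ x < b.2) (hx : x < ce.2) :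
    (PySem.List.enumerate (pre ++ ce :: rest)).find? (fun p => decide (x < p.2.2)) =
      some ((pre.length : Int), ce) := by
  rw [PySem.List.enumerate_append, List.find?_append]
  have h1 : (PySem.List.enumerate pre).find? (fun p => decide (x < p.2.2)) = none := by
    apply List.find?_eq_none.mpr
    intro p hp
    rcases (PySem.List.mem_enumerate_iff _ _ _).mp hp with ⟨k, hk, rfl⟩
    simpa using hpre _ (List.getElem_mem hk)
  rw [h1]
  simp [PySem.List.enumerate_cons, hx]

lemma dropWhile_lower (t : Int) :
    ∀ (ls : List Int), ls.Pairwise (· ≤ ·) →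
      ∀ x ∈ ls.dropWhile (fun y => decide (y < t)), ¬ x < t := by
  intro ls
  induction ls with
  | nil => intro _ x hx; simp at hx
  | cons a rest ih =>
    intro hp x hx
    rw [List.dropWhile_cons] at hx
    rcases List.pairwise_cons.mp hp with ⟨ha, hrest⟩
    by_cases hat : a < t
    · simp only [hat, decide_true, if_true] at hx
      exact ih hrest x hx
    · simp only [hat, decide_false] at hx
      rcases List.mem_cons.mp hx with rfl | hx'
      · exact hat
      · have := ha x hx'
        omega

lemma pvMain :
    ∀ (pls : List Int) (pre : List (Int × Int)) (ls : List Int)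
      (d : PySem.Dict Int (List Int)) (c : Int),
      ls.Pairwise (· ≤ ·) →
      (∀ x ∈ ls, ∀ b ∈ pre, ¬ x < b.2) →
      pvAOuter pls (pre.length : Int) c d ls = ls.foldl (pvBStep (pre ++ pvBounds pls c)) d := by
  intro pls
  induction pls with
  | nil =>
    intro pre ls d c _ hpre
    simp only [pvAOuter, pvBounds, List.append_nil]
    exact (foldl_pvBStep_no_match pre ls d hpre).symm
  | cons pl pls' ih =>
    intro pre ls d c hsorted hpre
    simp only [pvAOuter, pvBounds]
    rw [pvAWhile_spec]
    set p := fun x : Int => decide (x < c + pl) with hp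
    set tk := ls.takeWhile p with htk
    set dr := ls.dropWhile p with hdr
    have hsplit : ls = tk ++ dr := (List.takeWhile_append_dropWhile).symm
    rw [hsplit, List.foldl_append]
    have htkfold : tk.foldl (pvBStep (pre ++ (c, c + pl) :: pvBounds pls' (c + pl))) d
        = tk.foldl (pvAStep (pre.length : Int) c) d := by
      apply PySem.List.foldl_congr_mem
      intro acc x hx
      have hxlt : x < c + pl := by
        have := List.mem_takeWhile_imp hx
        simpa [hp] using this
      have hxpre : ∀ b ∈ pre, ¬ x < b.2 := hpre x ((List.takeWhile_sublist _).subset hx)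
      unfold pvBStep
      rw [find?_locate pre (c, c + pl) (pvBounds pls' (c + pl)) x hxpre (by simpa using hxlt)]
      unfold pvAStep
      by_cases hc : acc.contains (pre.length : Int)
      · simp [PySem.Dict.setdefault_of_contains, hc]
      · have hc' : acc.contains (pre.length : Int) = false := by simpa using hc
        simp [PySem.Dict.setdefault_of_not_contains, hc']
    rw [htkfold]
    have hdrs : dr.Sublist ls := List.dropWhile_sublist _
    have ihres := ih (pre ++ [(c, c + pl)]) dr
      (tk.foldl (pvAStep (pre.length : Int) c) d) (c + pl)
      (hsorted.sublist hdrs)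
      (by
        intro x hx b hb
        rcases List.mem_append.mp hb with hb' | hb'
        · exact hpre x (hdrs.subset hx) b hb'
        · have : b = (c, c + pl) := by simpa using hb'
          subst this
          exact dropWhile_lower (c + pl) ls hsorted x hx)
    rw [List.append_assoc] at ihres
    simp only [List.length_append, List.length_cons, List.length_nil] at ihres
    have hcast : ((pre.length + (0 + 1) : Nat) : Int) = (pre.length : Int) + 1 := by push_cast; ring
    rw [hcast] at ihres
    simpa using ihres

-- ===== VERDICT (by name: the statement is the Claim_ definition above) =====
theorem get_lines_page_numbers_spec : Claim_equal_get_lines_page_numbers := by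
  intro lines page_lengths _
  unfold Spec_get_lines_page_numbers get_lines_page_numbers get_lines_page_numbers_alt
  congr 1
  have h := pvMain page_lengths [] (PySem.List.sorted lines (fun x => x) false)
    PySem.Dict.empty 0 (by simpa using PySem.List.sorted_pairwise lines (fun x => x))
    (by intro x _ b hb; simp at hb)
  simpa using h
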